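-- pv_equiv track=rewrite | github.com/docxology/template | projects/ento_linguistics/src/analysis/rhetorical_analysis.py | identify_narrative_frameworks
-- ===== SOURCE A (Python) =====
-- from typing import Any, Dict, List
--
-- def identify_narrative_frameworks(texts: List[str]) -> Dict[str, List[str]]:
--     """Identify narrative frameworks used in texts.
--
--     Args:
--         texts: Texts to analyze
--
--     Returns:
--         Dictionary of narrative frameworks and examples
--     """
--     frameworks = {
--         "progress_narrative": [],
--         "conflict_narrative": [],
--         "discovery_narrative": [],
--         "complexity_narrative": [],
--     }
--
--     for text in texts:
--         text_lower = text.lower()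
--
--         # Progress narratives (advancement, improvement)
--         if any(
--             word in text_lower
--             for word in ["advance", "improvement", "progress", "development"]
--         ):
--             frameworks["progress_narrative"].append(text[:100] + "...")
--
--         # Conflict narratives (struggle, adaptation)
--         if any(
--             word in text_lower
--             for word in ["struggle", "adaptation", "conflict", "competition"]
--         ):
--             frameworks["conflict_narrative"].append(text[:100] + "...")
--
--         # Discovery narratives (finding, revealing)
--         if any(
--             word in text_lower for word in ["discover", "reveal", "find", "uncover"]
--         ):
--             frameworks["discovery_narrative"].append(text[:100] + "...")
--
--         # Complexity narratives (complex, sophisticated)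
--         if any(
--             word in text_lower
--             for word in ["complex", "sophisticated", "intricate", "elaborate"]
--         ):
--             frameworks["complexity_narrative"].append(text[:100] + "...")
--
--     return frameworks
-- ===== SOURCE B (Python) =====
-- def _classify_one(text):
--     low = text.lower()
--     snip = text[:100] + "..."
--
--     def hit(kws):
--         return [snip] if any(k in low for k in kws) else []
--
--     return (hit(["advance", "improvement", "progress", "development"]),
--             hit(["struggle", "adaptation", "conflict", "competition"]),
--             hit(["discover", "reveal", "find", "uncover"]),
--             hit(["complex", "sophisticated", "intricate", "elaborate"]))
--
--
-- def _merge(l, r):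
--     return (l[0] + r[0], l[1] + r[1], l[2] + r[2], l[3] + r[3])
--
--
-- def _solve(ts):
--     if not ts:
--         return ([], [], [], [])
--     if len(ts) == 1:
--         return _classify_one(ts[0])
--     mid = len(ts) // 2
--     return _merge(_solve(ts[:mid]), _solve(ts[mid:]))
--
--
-- def identify_narrative_frameworks(texts):
--     """Identify narrative frameworks (divide-and-conquer over halves)."""
--     p, c, d, x = _solve(texts)
--     return {
--         "progress_narrative": p,
--         "conflict_narrative": c,
--         "discovery_narrative": d,
--         "complexity_narrative": x,
--     }
-- ===== Notes on version B (the rewrite author's own statement) =====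
-- stated objective: alternative
-- what changed: Replaces A's single text-outer pass that mutates a four-key dict with a divide-and-conquer: texts are recursively split in halves, each half classified into a 4-tuple of per-category snippet lists, and the halves merged by per-category concatenation.
import Mathlib
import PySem

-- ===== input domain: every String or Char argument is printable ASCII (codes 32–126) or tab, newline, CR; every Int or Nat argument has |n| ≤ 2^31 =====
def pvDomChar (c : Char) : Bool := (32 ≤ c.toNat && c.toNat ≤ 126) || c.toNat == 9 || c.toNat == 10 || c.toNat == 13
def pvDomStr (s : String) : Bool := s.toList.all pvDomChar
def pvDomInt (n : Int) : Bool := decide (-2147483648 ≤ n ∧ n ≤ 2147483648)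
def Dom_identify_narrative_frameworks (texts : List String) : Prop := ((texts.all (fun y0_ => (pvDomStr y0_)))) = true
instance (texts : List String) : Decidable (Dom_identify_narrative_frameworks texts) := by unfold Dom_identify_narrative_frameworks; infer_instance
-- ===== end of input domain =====

-- ===== PORT A =====
-- A-side helper: the body of A's 'for text in texts' loop
def pvBodyA (fw : PySem.Dict String (List String)) (text : String) : PySem.Dict String (List String) :=
      let text_lower := PySem.Str.lower text
      let fw :=
        if ["advance", "improvement", "progress", "development"].any
            (fun word => PySem.Str.isIn word text_lower) then
          PySem.Dict.modify fw "progress_narrative" []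
            (fun l => l ++ [PySem.Str.join "" [PySem.Str.slice text none (some 100), "..."]])
        else fw
      let fw :=
        if ["struggle", "adaptation", "conflict", "competition"].any
            (fun word => PySem.Str.isIn word text_lower) then
          PySem.Dict.modify fw "conflict_narrative" []
            (fun l => l ++ [PySem.Str.join "" [PySem.Str.slice text none (some 100), "..."]])
        else fw
      let fw :=
        if ["discover", "reveal", "find", "uncover"].any
            (fun word => PySem.Str.isIn word text_lower) then
          PySem.Dict.modify fw "discovery_narrative" []
            (fun l => l ++ [PySem.Str.join "" [PySem.Str.slice text none (some 100), "..."]])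
        else fw
      let fw :=
        if ["complex", "sophisticated", "intricate", "elaborate"].any
            (fun word => PySem.Str.isIn word text_lower) then
          PySem.Dict.modify fw "complexity_narrative" []
            (fun l => l ++ [PySem.Str.join "" [PySem.Str.slice text none (some 100), "..."]])
        else fw
      fw

def identify_narrative_frameworks (texts : List String) : List (String × List String) :=
  let frameworks : PySem.Dict String (List String) :=
    ((((PySem.Dict.empty).insert "progress_narrative" []).insert "conflict_narrative" []).insert
        "discovery_narrative" []).insert "complexity_narrative" []
  (texts.foldl pvBodyA frameworks).items

-- ===== PORT B =====
-- header: B replaces A's text-outer dict-mutating pass by divide-and-conquer — split the texts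
-- in halves, classify each half into a 4-tuple of per-category lists, merge by concatenation
-- (objective: alternative, same cost).
def pvHit (low snip : String) (kws : List String) : List String :=
  if kws.any (fun k => PySem.Str.isIn k low) then [snip] else []

def pvClassifyOne (text : String) :
    List String × List String × List String × List String :=
  let low := PySem.Str.lower text
  let snip := PySem.Str.join "" [PySem.Str.slice text none (some 100), "..."]
  (pvHit low snip ["advance", "improvement", "progress", "development"],
   pvHit low snip ["struggle", "adaptation", "conflict", "competition"],
   pvHit low snip ["discover", "reveal", "find", "uncover"],
   pvHit low snip ["complex", "sophisticated", "intricate", "elaborate"])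

def pvMerge (l r : List String × List String × List String × List String) :
    List String × List String × List String × List String :=
  (l.1 ++ r.1, l.2.1 ++ r.2.1, l.2.2.1 ++ r.2.2.1, l.2.2.2 ++ r.2.2.2)

-- ts[:mid] / ts[mid:] ported as take/drop: exact, since 0 ≤ mid ≤ len(ts)
def pvSolve (ts : List String) : List String × List String × List String × List String :=
  match ts with
  | [] => ([], [], [], [])
  | [t] => pvClassifyOne t
  | t1 :: t2 :: rest =>
    let mid := (t1 :: t2 :: rest).length / 2
    pvMerge (pvSolve ((t1 :: t2 :: rest).take mid)) (pvSolve ((t1 :: t2 :: rest).drop mid))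
termination_by ts.length
decreasing_by
  · simp; omega
  · simp; omega

def identify_narrative_frameworks_alt (texts : List String) : List (String × List String) :=
  let r := pvSolve texts
  [("progress_narrative", r.1), ("conflict_narrative", r.2.1),
   ("discovery_narrative", r.2.2.1), ("complexity_narrative", r.2.2.2)]

-- ===== PRECONDITION & SPEC =====
def Spec_identify_narrative_frameworks (texts : List String) (out : List (String × List String)) : Prop := out = identify_narrative_frameworks_alt texts
instance (texts : List String) (out : List (String × List String)) : Decidable (Spec_identify_narrative_frameworks texts out) := by unfold Spec_identify_narrative_frameworks; infer_instance

-- ===== CLAIM (what is proved, stated in full; the proofs are below) =====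
def Claim_equal_identify_narrative_frameworks : Prop := ∀ (texts : List String), Dom_identify_narrative_frameworks texts → Spec_identify_narrative_frameworks texts (identify_narrative_frameworks texts)

-- ===== LEMMAS AND PROOFS =====

-- proof-only abbreviation: snippets of the texts matching a keyword group, in text order
def pvF (kws : List String) (ts : List String) : List String :=
  (ts.filter (fun t => kws.any (fun k => PySem.Str.isIn k (PySem.Str.lower t)))).map
    (fun t => PySem.Str.join "" [PySem.Str.slice t none (some 100), "..."])

set_option maxHeartbeats 1600000 in
-- one step of A's loop on a 4-key literal dict
lemma pvStep (t : String) (a b c d : List String) :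
    pvBodyA
      ⟨[("progress_narrative", a), ("conflict_narrative", b),
        ("discovery_narrative", c), ("complexity_narrative", d)]⟩ t =
    ⟨[("progress_narrative", if (["advance", "improvement", "progress", "development"].any (fun word => PySem.Str.isIn word (PySem.Str.lower t))) then a ++ [PySem.Str.join "" [PySem.Str.slice t none (some 100), "..."]] else a),
      ("conflict_narrative", if (["struggle", "adaptation", "conflict", "competition"].any (fun word => PySem.Str.isIn word (PySem.Str.lower t))) then b ++ [PySem.Str.join "" [PySem.Str.slice t none (some 100), "..."]] else b),
      ("discovery_narrative", if (["discover", "reveal", "find", "uncover"].any (fun word => PySem.Str.isIn word (PySem.Str.lower t))) then c ++ [PySem.Str.join "" [PySem.Str.slice t none (some 100), "..."]] else c),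
      ("complexity_narrative", if (["complex", "sophisticated", "intricate", "elaborate"].any (fun word => PySem.Str.isIn word (PySem.Str.lower t))) then d ++ [PySem.Str.join "" [PySem.Str.slice t none (some 100), "..."]] else d)]⟩ := by
  unfold pvBodyA
  split_ifs <;>
    simp_all [PySem.Dict.modify, PySem.Dict.insert, PySem.Dict.getD, PySem.Dict.get?,
      PySem.Dict.contains]

-- loop invariant: folding A's body over texts from a 4-key literal dict appends, per key,
-- the snippets of exactly the texts matching that key's keywords
lemma pvLoop (texts : List String) (a b c d : List String) :
    (texts.foldl
      pvBodyA
      ⟨[("progress_narrative", a), ("conflict_narrative", b),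
        ("discovery_narrative", c), ("complexity_narrative", d)]⟩).items =
    [("progress_narrative", a ++ pvF ["advance", "improvement", "progress", "development"] texts),
     ("conflict_narrative", b ++ pvF ["struggle", "adaptation", "conflict", "competition"] texts),
     ("discovery_narrative", c ++ pvF ["discover", "reveal", "find", "uncover"] texts),
     ("complexity_narrative", d ++ pvF ["complex", "sophisticated", "intricate", "elaborate"] texts)] := by
  induction texts generalizing a b c d with
  | nil => simp [pvF]
  | cons t ts ih =>
    rw [List.foldl_cons, pvStep, ih]
    unfold pvF
    rw [List.filter_cons, List.filter_cons, List.filter_cons, List.filter_cons]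
    split_ifs <;> simp

-- pvHit on one text computes pvF of the singleton
lemma pvHit_eq (t : String) (kws : List String) :
    pvHit (PySem.Str.lower t) (PySem.Str.join "" [PySem.Str.slice t none (some 100), "..."]) kws
      = pvF kws [t] := by
  unfold pvHit pvF
  rw [List.filter_cons]
  cases h : kws.any (fun k => PySem.Str.isIn k (PySem.Str.lower t)) <;>
    simp [h]

-- pvF distributes over list append
lemma pvF_append (kws : List String) (l r : List String) :
    pvF kws (l ++ r) = pvF kws l ++ pvF kws r := by
  simp [pvF]

-- the divide-and-conquer solve computes, per category, the matching snippets in text order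
lemma pvSolve_eq (ts : List String) :
    pvSolve ts =
      (pvF ["advance", "improvement", "progress", "development"] ts,
       pvF ["struggle", "adaptation", "conflict", "competition"] ts,
       pvF ["discover", "reveal", "find", "uncover"] ts,
       pvF ["complex", "sophisticated", "intricate", "elaborate"] ts) := by
  have key : ∀ n (ts : List String), ts.length = n →
      pvSolve ts =
        (pvF ["advance", "improvement", "progress", "development"] ts,
         pvF ["struggle", "adaptation", "conflict", "competition"] ts,
         pvF ["discover", "reveal", "find", "uncover"] ts,
         pvF ["complex", "sophisticated", "intricate", "elaborate"] ts) := by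
    intro n
    induction n using Nat.strong_induction_on with
    | _ n ih =>
      intro ts hlen
      match ts with
      | [] => simp [pvSolve, pvF]
      | [t] =>
        rw [show pvSolve [t] = pvClassifyOne t from by simp [pvSolve]]
        simp only [pvClassifyOne, pvHit_eq]
      | t1 :: t2 :: rest =>
        rw [pvSolve]
        have h1 : ((t1 :: t2 :: rest).take ((t1 :: t2 :: rest).length / 2)).length < n := by
          simp at hlen ⊢; omega
        have h2 : ((t1 :: t2 :: rest).drop ((t1 :: t2 :: rest).length / 2)).length < n := by
          simp at hlen ⊢; omega
        rw [ih _ h1 _ rfl, ih _ h2 _ rfl]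
        simp only [pvMerge, ← pvF_append, List.take_append_drop]
  exact key ts.length ts rfl

-- ===== VERDICT (by name: the statement is the Claim_ definition above) =====
theorem identify_narrative_frameworks_spec : Claim_equal_identify_narrative_frameworks := by
  intro texts _
  unfold Spec_identify_narrative_frameworks identify_narrative_frameworks
    identify_narrative_frameworks_alt
  rw [show ((((PySem.Dict.empty).insert "progress_narrative" []).insert "conflict_narrative" []).insert
        "discovery_narrative" []).insert "complexity_narrative" [] =
      (⟨[("progress_narrative", []), ("conflict_narrative", []),
        ("discovery_narrative", []), ("complexity_narrative", [])]⟩ : PySem.Dict String (List String))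
    from rfl]
  rw [pvLoop, pvSolve_eq]
  simp
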